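-- pv_equiv track=rewrite | github.com/Ei3-kw/advent_of_code | 2024/9/9.py | compact_filesystem
-- ===== SOURCE A (Python) =====
-- def compact_filesystem(init):
--     # Convert initial state to list of files
--     fs = []
--     curr = 0
--     while curr < len(init):
--         if init[curr] != '_':
--             f = init[curr]
--             start = curr
--             while curr < len(init) and init[curr] == f:
--                 curr += 1
--             fs.append((f, start, curr - start))
--         else:
--             curr += 1
--
--     # Sort files by file ID in descending order
--     fs.sort(key=lambda x: x[0], reverse=True)
--
--     # Create mutable state to track filesystem
--     state = init.copy()
--
--     # Compact each file
--     for f, start, length in fs: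
--         # Find leftmost free space that can accommodate this file
--         best = None
--         for left in range(len(state) - length + 1):
--             if all(state[i] == '_' for i in range(left, left + length)):
--                 best = left
--                 break
--
--         # If suitable space found, move file
--         if best is not None and best < start:
--             # Clear original position
--             for i in range(start, start + length):
--                 state[i] = '_'
--
--             # Place file in new position
--             for i in range(length):
--                 state[best + i] = f
--
--     return state
-- ===== SOURCE B (Python) =====
-- def _parse(init):
--     # run-length parse: files [(char, start, length)] and free gaps [(start, length)], in position order
--     files, gaps = [], []
--     i = 0
--     while i < len(init):
--         j = i
--         while j < len(init) and init[j] == init[i]: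
--             j += 1
--         if init[i] == '_':
--             gaps.append((i, j - i))
--         else:
--             files.append((init[i], i, j - i))
--         i = j
--     return files, gaps
--
--
-- def _pop_fit(gaps, L):
--     # first gap with size >= L: (its start, gap list with that gap shrunk by L), else None
--     for k, (p, g) in enumerate(gaps):
--         if g >= L:
--             return p, gaps[:k] + ([(p + L, g - L)] if g > L else []) + gaps[k + 1:]
--     return None
--
--
-- def _add_gap(gaps, lo, hi):
--     # insert the freed interval [lo, hi), coalescing with any touching gaps
--     out = []
--     k = 0
--     while k < len(gaps):
--         p, g = gaps[k]
--         if p + g < lo: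
--             out.append((p, g)); k += 1
--         elif p > hi:
--             break
--         else:
--             lo = min(lo, p); hi = max(hi, p + g); k += 1
--     return out + [(lo, hi - lo)] + gaps[k:]
--
--
-- def compact_filesystem(init):
--     files, gaps = _parse(init)
--     placements = []
--     for f, s, L in sorted(files, key=lambda t: t[0], reverse=True):
--         r = _pop_fit(gaps, L)
--         if r is not None and r[0] < s:
--             p, gaps = r
--             gaps = _add_gap(gaps, s, s + L)
--             placements.append((f, p, L))
--         else:
--             placements.append((f, s, L))
--     out = ['_'] * len(init)
--     for f, p, L in placements:
--         out[p:p + L] = [f] * L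
--     return out
-- ===== Notes on version B (the rewrite author's own statement) =====
-- stated objective: faster
-- what changed: B never touches a cell array while compacting: it run-length parses the disk once into file runs plus a sorted list of coalesced free intervals, serves each file by popping the first fitting interval and re-inserting the freed span with interval merging, and renders the output array once from the recorded placements, instead of A's per-file window scan and in-place cell rewriting.
import Mathlib
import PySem

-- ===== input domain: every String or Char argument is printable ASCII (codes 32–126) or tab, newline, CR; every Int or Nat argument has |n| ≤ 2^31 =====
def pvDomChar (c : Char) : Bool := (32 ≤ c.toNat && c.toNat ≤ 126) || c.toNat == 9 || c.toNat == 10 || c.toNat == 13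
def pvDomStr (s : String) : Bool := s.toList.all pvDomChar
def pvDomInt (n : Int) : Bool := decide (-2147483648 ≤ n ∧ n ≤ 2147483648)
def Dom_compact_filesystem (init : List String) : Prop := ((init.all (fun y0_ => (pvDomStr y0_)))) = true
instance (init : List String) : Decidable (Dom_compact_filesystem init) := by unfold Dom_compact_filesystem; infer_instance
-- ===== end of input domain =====

-- B replaces A's cell-array simulation by interval bookkeeping: one run-length parse into file
-- runs and coalesced free intervals, each file is served by popping the first fitting interval
-- (re-inserting its freed span with merging), and the array is rendered once at the end;
-- a timing run measured B faster.

-- ===== PORT A =====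
-- inner while of the parse: how many leading cells equal f
def pvCountRun : List String → String → Nat
  | [], _ => 0
  | c :: t, f => if c == f then 1 + pvCountRun t f else 0

-- outer while of the parse: pos is the Python index `curr`
def pvParseA : List String → Int → List (String × Int × Int)
  | [], _ => []
  | c :: t, pos =>
    if c == "_" then pvParseA t (pos + 1)
    else
      let k := 1 + pvCountRun t c
      (c, pos, (k : Int)) :: pvParseA (t.drop (pvCountRun t c)) (pos + (k : Int))
termination_by l => l.length
decreasing_by all_goals (have h := @List.length_drop _ (pvCountRun t c) t; simp only [List.length_cons]; omega)

-- `all(state[i] == '_' for i in range(left, left+length))`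
def pvAllUnder (state : List String) (left L : Int) : Bool :=
  (PySem.List.pyRange left (left + L) 1).all (fun i => PySem.List.pyGetD state i "" == "_")

-- `for left in range(len(state) - length + 1): if all(...): best = left; break`
def pvFindA (state : List String) (L : Int) : Option Int :=
  (PySem.List.pyRange 0 ((state.length : Int) - L + 1) 1).find? (fun left => pvAllUnder state left L)

-- `for i in range(start, start+length): state[i] = '_'`
def pvClear (state : List String) (s e : Int) : List String :=
  (PySem.List.pyRange s e 1).foldl (fun st i => PySem.List.pySetD st i "_") state

-- `for i in range(length): state[best + i] = f`
def pvPlace (state : List String) (best : Int) (f : String) (L : Int) : List String :=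
  (PySem.List.pyRange 0 L 1).foldl (fun st i => PySem.List.pySetD st (best + i) f) state

-- body of A's `for f, start, length in fs:` loop
def pvStepA (state : List String) (x : String × Int × Int) : List String :=
  match x with
  | (f, start, length) =>
    match pvFindA state length with
    | some b => if b < start then pvPlace (pvClear state start (start + length)) b f length else state
    | none => state

def compact_filesystem (init : List String) : List String :=
  (PySem.List.sorted (pvParseA init 0) (fun x => x.1) true).foldl pvStepA init

-- ===== PORT B =====
-- inner while of B's parse: length of the run of cells equal to c
def pvRunB (t : List String) (c : String) : Nat := (t.takeWhile (fun x => x == c)).length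

-- B's run-length parse: (file runs, free gaps), both in position order
def pvParseB : List String → Int → (List (String × Int × Int)) × (List (Int × Int))
  | [], _ => ([], [])
  | c :: t, i =>
    let k := 1 + pvRunB t c
    let r := pvParseB (t.drop (pvRunB t c)) (i + (k : Int))
    if c == "_" then (r.1, (i, (k : Int)) :: r.2)
    else ((c, i, (k : Int)) :: r.1, r.2)
termination_by l => l.length
decreasing_by all_goals (have h := @List.length_drop _ (pvRunB t c) t; simp only [List.length_cons]; omega)

-- `_pop_fit`: first gap with size >= L, shrunk by L
def pvPopFit : List (Int × Int) → Int → Option (Int × List (Int × Int))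
  | [], _ => none
  | (p, g) :: t, L =>
    if L ≤ g then some (p, (if L < g then [(p + L, g - L)] else []) ++ t)
    else (pvPopFit t L).map (fun r => (r.1, (p, g) :: r.2))

-- `_add_gap`: insert the freed interval [lo, hi), coalescing with touching gaps
def pvAddGap : List (Int × Int) → Int → Int → List (Int × Int)
  | [], lo, hi => [(lo, hi - lo)]
  | (p, g) :: t, lo, hi =>
    if p + g < lo then (p, g) :: pvAddGap t lo hi
    else if hi < p then (lo, hi - lo) :: (p, g) :: t
    else pvAddGap t (min lo p) (max hi (p + g))
termination_by l => l.length

-- `out[s:s+L] = [v]*L` (slice assignment; s, L are nonnegative in-range here)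
def pvSplice (state : List String) (s L : Int) (v : String) : List String :=
  state.take s.toNat ++ List.replicate L.toNat v ++ state.drop (s.toNat + L.toNat)

-- body of B's `for f, s, L in sorted(files, ...):` loop over (gaps, placements)
def pvStepB (acc : List (Int × Int) × List (String × Int × Int)) (x : String × Int × Int) :
    List (Int × Int) × List (String × Int × Int) :=
  match x with
  | (f, s, L) =>
    match pvPopFit acc.1 L with
    | some (p, rest) =>
      if p < s then (pvAddGap rest s (s + L), acc.2 ++ [(f, p, L)])
      else (acc.1, acc.2 ++ [(f, s, L)])
    | none => (acc.1, acc.2 ++ [(f, s, L)])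

def compact_filesystem_alt (init : List String) : List String :=
  ((PySem.List.sorted (pvParseB init 0).1 (fun x => x.1) true).foldl pvStepB
      ((pvParseB init 0).2, [])).2.foldl
    (fun out x => pvSplice out x.2.1 x.2.2 x.1) (List.replicate init.length "_")

-- ===== PRECONDITION & SPEC =====
def Spec_compact_filesystem (init : List String) (out : List String) : Prop := out = compact_filesystem_alt init
instance (init : List String) (out : List String) : Decidable (Spec_compact_filesystem init out) := by unfold Spec_compact_filesystem; infer_instance

-- ===== CLAIM (what is proved, stated in full; the proofs are below) =====
def Claim_equal_compact_filesystem : Prop := ∀ (init : List String), Dom_compact_filesystem init → Spec_compact_filesystem init (compact_filesystem init)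

-- ===== LEMMAS AND PROOFS =====

-- invariant machinery (used only by the proofs)

def pvCovers (t : String × Int × Int) (i : Int) : Prop := t.2.1 ≤ i ∧ i < t.2.1 + t.2.2

def pvMemG (gaps : List (Int × Int)) (i : Int) : Prop := ∃ pg ∈ gaps, pg.1 ≤ i ∧ i < pg.1 + pg.2

def pvWFg (n : Int) (gaps : List (Int × Int)) : Prop :=
  List.Pairwise (fun a b => a.1 + a.2 < b.1) gaps ∧
  ∀ pg ∈ gaps, 0 ≤ pg.1 ∧ 1 ≤ pg.2 ∧ pg.1 + pg.2 ≤ n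

def pvOcc (state : List String) (t : String × Int × Int) : Prop :=
  t.1 ≠ "_" ∧ ∃ s L : Nat, t.2.1 = (s : Int) ∧ t.2.2 = (L : Int) ∧ 1 ≤ L ∧ s + L ≤ state.length ∧
    ∀ i : Nat, s ≤ i → i < s + L → state.getD i "" = t.1

def pvDisj (a b : String × Int × Int) : Prop := ∀ i : Int, ¬(pvCovers a i ∧ pvCovers b i)

def pvInv (n : Nat) (state : List String) (gaps : List (Int × Int))
    (pl rem : List (String × Int × Int)) : Prop :=
  state.length = n ∧ pvWFg (n : Int) gaps ∧
  (∀ i : Nat, i < n → (state.getD i "" = "_" ↔ pvMemG gaps (i : Int))) ∧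
  (∀ t ∈ pl ++ rem, pvOcc state t) ∧
  (∀ i : Nat, i < n → state.getD i "" ≠ "_" → ∃ t ∈ pl ++ rem, pvCovers t (i : Int)) ∧
  List.Pairwise pvDisj (pl ++ rem)

def pvRender (n : Nat) (pl : List (String × Int × Int)) : List String :=
  pl.foldl (fun out x => pvSplice out x.2.1 x.2.2 x.1) (List.replicate n "_")

-- splice pointwise
theorem pvFoldSet_eq_splice (v : String) (k : Nat) : ∀ (state : List String) (b : Nat),
    b + k ≤ state.length →
    (List.range k).foldl (fun st j => st.set (b + j) v) state
      = state.take b ++ List.replicate k v ++ state.drop (b + k) := by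
  induction k with
  | zero => intro state b h; simp
  | succ k ih =>
    intro state b h
    rw [List.range_succ_eq_map]
    simp only [List.foldl_cons, List.foldl_map, Nat.add_zero]
    have hb : b < state.length := by omega
    have hset : state.set b v = state.take b ++ v :: state.drop (b+1) :=
      List.set_eq_take_cons_drop v hb
    have := ih (state.set b v) (b + 1) (by simp; omega)
    rw [show (fun (st : List String) (j : Nat) => st.set (b + Nat.succ j) v)
         = (fun st j => st.set ((b + 1) + j) v) by funext st j; congr 1; omega]
    rw [this, hset]
    rw [List.take_append, List.drop_append]
    have hlt : (state.take b).length = b := by simp; omega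
    rw [hlt, show b + 1 - b = 1 by omega, show b + 1 + k - b = k + 1 by omega]
    simp only [List.take_succ_cons, List.take_zero, List.drop_succ_cons, List.drop_drop,
      List.nil_append, List.cons_append, List.append_assoc, List.replicate_succ]
    rw [List.take_of_length_le (le_trans (List.length_take_le b state) (by omega)),
        List.drop_of_length_le (le_trans (List.length_take_le b state) (by omega)),
        show b + 1 + k = b + (k + 1) by omega]
    simp

theorem pvSplice_len (st : List String) (s L : Nat) (v : String) (h : s + L ≤ st.length) :
    (pvSplice st (s : Int) (L : Int) v).length = st.length := by
  simp [pvSplice]; omega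

theorem pvSplice_getD (st : List String) (s L : Nat) (v : String) (h : s + L ≤ st.length) (i : Nat) :
    (pvSplice st (s : Int) (L : Int) v).getD i "" =
      if s ≤ i ∧ i < s + L then v else st.getD i "" := by
  unfold pvSplice
  rw [Int.toNat_natCast, Int.toNat_natCast]
  have hts : (st.take s).length = s := by simp; omega
  by_cases h1 : i < s
  · rw [if_neg (by omega), List.getD_eq_getElem?_getD,
      List.getElem?_append_left (by simp only [List.length_append, hts, List.length_replicate]; omega),
      List.getElem?_append_left (by omega),
      List.getElem?_take_of_lt h1, List.getD_eq_getElem?_getD]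
  · by_cases h2 : i < s + L
    · rw [if_pos ⟨by omega, h2⟩, List.getD_eq_getElem?_getD,
        List.getElem?_append_left (by simp only [List.length_append, hts, List.length_replicate]; omega),
        List.getElem?_append_right (by omega), hts, List.getElem?_replicate,
        if_pos (by omega)]
      rfl
    · rw [if_neg (by omega), List.getD_eq_getElem?_getD,
        List.getElem?_append_right (by simp only [List.length_append, hts, List.length_replicate]; omega),
        List.getElem?_drop, List.getD_eq_getElem?_getD]
      congr 2
      simp only [List.length_append, hts, List.length_replicate]
      omega

-- A-side loop shapes (clear/place are splices)
def pvSpecFind : List String → Nat → Option Nat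
  | [], _ => none
  | c :: t, L =>
    if L ≤ (c :: t).length ∧ ((c :: t).take L).all (· == "_") then some 0
    else (pvSpecFind t L).map (· + 1)

theorem pvClear_eq_splice (state : List String) (s k : Nat) (h : s + k ≤ state.length) :
    pvClear state (s : Int) ((s : Int) + (k : Int)) = pvSplice state (s : Int) (k : Int) "_" := by
  unfold pvClear pvSplice
  rw [PySem.List.pyRange_one, List.foldl_map]
  have harg : ∀ (st : List String) (j : Nat),
      PySem.List.pySetD st ((s : Int) + (j : Nat)) "_" = st.set (s + j) "_" := by
    intro st j
    rw [show ((s : Int) + (j : Nat)) = (((s + j : Nat)) : Int) by push_cast; ring,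
        PySem.List.pySetD_natCast]
  simp only [harg]
  rw [show ((s : Int) + (k : Nat) - (s : Nat)).toNat = k by omega]
  have := pvFoldSet_eq_splice "_" k state s h
  simpa using this

theorem pvPlace_eq_splice (state : List String) (b k : Nat) (f : String) (h : b + k ≤ state.length) :
    pvPlace state (b : Int) f (k : Int) = pvSplice state (b : Int) (k : Int) f := by
  unfold pvPlace pvSplice
  rw [PySem.List.pyRange_one, List.foldl_map]
  have harg : ∀ (st : List String) (j : Nat),
      PySem.List.pySetD st ((b : Int) + ((0 : Int) + (j : Nat))) f = st.set (b + j) f := by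
    intro st j
    rw [show ((b : Int) + ((0 : Int) + (j : Nat))) = (((b + j : Nat)) : Int) by push_cast; ring,
        PySem.List.pySetD_natCast]
  simp only [harg]
  rw [show ((k : Nat) - (0:Int)).toNat = k by omega]
  have := pvFoldSet_eq_splice f k state b h
  simpa using this

theorem pvAllUnder_eq_window (cells : List String) (k L : Nat) (h : k + L ≤ cells.length) :
    pvAllUnder cells (k : Int) L = ((cells.drop k).take L).all (· == "_") := by
  unfold pvAllUnder
  rw [PySem.List.pyRange_one, List.all_map]
  rw [show ((k : Int) + (L : Int) - (k : Int)).toNat = L by omega]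
  rw [Bool.eq_iff_iff, List.all_eq_true, List.all_eq_true]
  constructor
  · intro hall x hx
    rw [List.mem_iff_getElem] at hx
    obtain ⟨i, hi, hix⟩ := hx
    have hiL : i < L := by
      have := List.length_take_le L (cells.drop k)
      have := @List.length_drop String k cells
      omega
    have := hall i (by simpa using hiL)
    simp only [Function.comp] at this
    rw [show (k : Int) + (i : Nat) = ((k + i : Nat) : Int) by push_cast; ring,
        PySem.List.pyGetD_natCast, List.getD_eq_getElem _ _ (by omega)] at this
    rw [← hix, List.getElem_take, List.getElem_drop]
    exact this
  · intro hall j hj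
    simp only [List.mem_range] at hj
    simp only [Function.comp]
    rw [show (k : Int) + (j : Nat) = ((k + j : Nat) : Int) by push_cast; ring,
        PySem.List.pyGetD_natCast, List.getD_eq_getElem _ _ (by omega)]
    have hmem : cells[k + j] ∈ (cells.drop k).take L := by
      rw [List.mem_iff_getElem]
      exact ⟨j, by simp; omega, by rw [List.getElem_take, List.getElem_drop]⟩
    exact hall _ hmem

theorem pvSpecFind_none_of_long (cells : List String) (L : Nat) (h : cells.length < L) :
    pvSpecFind cells L = none := by
  induction cells with
  | nil => rfl
  | cons c t ih =>
    simp only [pvSpecFind]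
    rw [if_neg (by rintro ⟨h1, -⟩; simp at h h1; omega), ih (by simp at h ⊢; omega)]
    rfl

theorem pvFind?_congr {α : Type} (l : List α) (p q : α → Bool) (h : ∀ k ∈ l, p k = q k) :
    l.find? p = l.find? q := by
  induction l with
  | nil => rfl
  | cons a l ih =>
    rw [List.find?_cons, List.find?_cons, h a (by simp)]
    split
    · rfl
    · exact ih (fun k hk => h k (by simp [hk]))

theorem pvWindowFind_eq_specFind (cells : List String) (L : Nat) (hL : 1 ≤ L) :
    (List.range (cells.length + 1 - L)).find?
        (fun k => ((cells.drop k).take L).all (· == "_"))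
      = pvSpecFind cells L := by
  induction cells with
  | nil => rw [show List.range (List.length [] + 1 - L) = [] by simp; omega]; rfl
  | cons c t ih =>
    by_cases hlen : L ≤ (c :: t).length
    · have : (c :: t).length + 1 - L = (t.length + 1 - L) + 1 := by simp at hlen ⊢; omega
      rw [this, List.range_succ_eq_map, List.find?_cons]
      split
      · rename_i hw
        simp only [List.drop_zero] at hw
        rw [pvSpecFind, if_pos ⟨hlen, hw⟩]
      · rename_i hw
        simp only [List.drop_zero] at hw
        rw [pvSpecFind, if_neg (by rintro ⟨-, h2⟩; rw [h2] at hw; cases hw)]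
        rw [List.find?_map]
        rw [pvFind?_congr _ _ (fun k => ((List.drop k t).take L).all (· == "_"))
              (by intro k hk; simp [Function.comp, List.drop_succ_cons])]
        rw [ih]
    · rw [show (c :: t).length + 1 - L = 0 by omega, List.range_zero, List.find?_nil]
      rw [pvSpecFind, if_neg (by rintro ⟨h1, -⟩; exact hlen h1)]
      rw [pvSpecFind_none_of_long t L (by simp at hlen; omega)]
      rfl

theorem pvFindA_eq_specFind (cells : List String) (L : Nat) (hL : 1 ≤ L) :
    pvFindA cells (L : Int) = (pvSpecFind cells L).map (fun n => (n : Int)) := by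
  unfold pvFindA
  rw [PySem.List.pyRange_one, List.find?_map]
  rw [show (((cells.length : Int) - (L : Int) + 1) - 0).toNat = cells.length + 1 - L by omega]
  rw [pvFind?_congr _ _ (fun k => ((cells.drop k).take L).all (· == "_"))
        (by
          intro k hk
          simp only [List.mem_range] at hk
          simp only [Function.comp]
          rw [show (0 : Int) + (k : Nat) = ((k : Nat) : Int) by ring]
          exact pvAllUnder_eq_window cells k L (by omega))]
  rw [pvWindowFind_eq_specFind cells L hL]
  cases pvSpecFind cells L with
  | none => rfl
  | some n => simp

-- leftmost-window characterisation of A's search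
theorem pvSpecFind_some (st : List String) (L : Nat) : ∀ j : Nat, pvSpecFind st L = some j →
    j + L ≤ st.length ∧ ((st.drop j).take L).all (· == "_") ∧
      ∀ j' < j, ¬(j' + L ≤ st.length ∧ ((st.drop j').take L).all (· == "_")) := by
  induction st with
  | nil => intro j h; simp [pvSpecFind] at h
  | cons c t ih =>
    intro j h
    rw [pvSpecFind] at h
    split at h
    · rename_i hcond
      cases h
      exact ⟨by simpa using hcond.1, by simpa using hcond.2, by intro j' hj' _; omega⟩
    · rename_i hcond
      cases hj : pvSpecFind t L with
      | none => rw [hj] at h; simp at h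
      | some j' =>
        rw [hj] at h
        simp only [Option.map_some] at h
        obtain ⟨h1, h2, h3⟩ := ih j' hj
        cases h
        refine ⟨by simp; omega, by simpa using h2, ?_⟩
        intro j'' hj'' hbad
        cases j'' with
        | zero => exact hcond ⟨by simpa using hbad.1, by simpa using hbad.2⟩
        | succ k => exact h3 k (by omega) ⟨by simp at hbad; omega, by simpa using hbad.2⟩

theorem pvSpecFind_none (st : List String) (L : Nat) (hL : 1 ≤ L) : pvSpecFind st L = none →
    ∀ j, j + L ≤ st.length → ¬(((st.drop j).take L).all (· == "_") = true) := by
  induction st with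
  | nil => intro _ j hj hw; simp at hj; omega
  | cons c t ih =>
    intro h j hj hw
    rw [pvSpecFind] at h
    split at h
    · simp at h
    · rename_i hcond
      cases j with
      | zero => exact hcond ⟨by simp at hj ⊢; omega, by simpa using hw⟩
      | succ k =>
        have ht : pvSpecFind t L = none := by
          cases hx : pvSpecFind t L with
          | none => rfl
          | some _ => rw [hx] at h; simp at h
        exact ih ht k (by simp at hj; omega) (by simpa using hw)

theorem pvWin_iff (st : List String) (j L : Nat) (h : j + L ≤ st.length) :
    (((st.drop j).take L).all (· == "_") = true) ↔ ∀ k < L, st.getD (j + k) "" = "_" := by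
  rw [List.all_eq_true]
  constructor
  · intro hall k hk
    have hmem : st[j + k]'(by omega) ∈ (st.drop j).take L := by
      rw [List.mem_iff_getElem]
      exact ⟨k, by simp; omega, by rw [List.getElem_take, List.getElem_drop]⟩
    have := hall _ hmem
    rw [List.getD_eq_getElem _ _ (by omega)]
    simpa using this
  · intro hpt x hx
    rw [List.mem_iff_getElem] at hx
    obtain ⟨k, hk, hkx⟩ := hx
    have hkL : k < L := by
      have := List.length_take_le L (st.drop j)
      have := @List.length_drop String j st
      omega
    have := hpt k hkL
    rw [List.getD_eq_getElem _ _ (by omega)] at this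
    rw [← hkx, List.getElem_take, List.getElem_drop]
    simpa using this

-- gap order facts
theorem pvMemG_cons (pg : Int × Int) (l : List (Int × Int)) (i : Int) :
    pvMemG (pg :: l) i ↔ (pg.1 ≤ i ∧ i < pg.1 + pg.2) ∨ pvMemG l i := by
  simp [pvMemG]

theorem pvWFg_rel {n : Int} {gaps : List (Int × Int)} (hw : pvWFg n gaps)
    {a b : Int × Int} (ha : a ∈ gaps) (hb : b ∈ gaps) (hne : a ≠ b) :
    a.1 + a.2 < b.1 ∨ b.1 + b.2 < a.1 := by
  have hp : List.Pairwise (fun x y : Int × Int => x.1 + x.2 < y.1 ∨ y.1 + y.2 < x.1) gaps :=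
    hw.1.imp (fun h => Or.inl h)
  exact hp.forall (fun x y h => h.elim Or.inr Or.inl) ha hb hne

theorem pvSucc_same_gap {n : Int} {gaps : List (Int × Int)} (hw : pvWFg n gaps)
    {p g i : Int} (hg : (p, g) ∈ gaps) (h1 : p ≤ i) (h2 : i < p + g)
    (h3 : pvMemG gaps (i + 1)) : i + 1 < p + g := by
  obtain ⟨q, hq, hq1, hq2⟩ := h3
  obtain ⟨q1, q2⟩ := q
  by_cases heq : (p, g) = (q1, q2)
  · cases heq; simp at hq1 hq2; omega
  · rcases pvWFg_rel hw hg hq heq with h | h <;> simp at h hq1 hq2 <;> omega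

-- popFit facts
theorem pvPopFit_none {gaps : List (Int × Int)} {L : Int} : pvPopFit gaps L = none →
    ∀ pg ∈ gaps, pg.2 < L := by
  induction gaps with
  | nil => intro _ pg hpg; simp at hpg
  | cons a t ih =>
    obtain ⟨p, g⟩ := a
    intro h pg hpg
    rw [pvPopFit] at h
    split at h
    · simp at h
    · rename_i hng
      rcases List.mem_cons.mp hpg with rfl | hm
      · simpa using hng
      · have ht : pvPopFit t L = none := by
          cases hx : pvPopFit t L with
          | none => rfl
          | some _ => rw [hx] at h; simp at h
        exact ih ht pg hm

theorem pvPopFit_some {gaps : List (Int × Int)} {L : Int} : ∀ {p : Int} {rest : List (Int × Int)},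
    pvPopFit gaps L = some (p, rest) →
    ∃ pre g suf, gaps = pre ++ (p, g) :: suf ∧ L ≤ g ∧ (∀ q ∈ pre, q.2 < L) ∧
      rest = pre ++ (if L < g then [(p + L, g - L)] else []) ++ suf := by
  induction gaps with
  | nil => intro p rest h; simp [pvPopFit] at h
  | cons a t ih =>
    obtain ⟨p0, g0⟩ := a
    intro p rest h
    rw [pvPopFit] at h
    split at h
    · rename_i hle
      simp only [Option.some_inj, Prod.mk.injEq] at h
      obtain ⟨rfl, rfl⟩ := h
      exact ⟨[], g0, t, by simp, hle, by simp, by simp⟩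
    · rename_i hng
      cases hx : pvPopFit t L with
      | none => rw [hx] at h; simp at h
      | some r =>
        obtain ⟨p', rest'⟩ := r
        rw [hx] at h
        simp only [Option.map_some, Option.some_inj, Prod.mk.injEq] at h
        obtain ⟨rfl, rfl⟩ := h
        obtain ⟨pre, g, suf, heq, hle, hsmall, hrest⟩ := ih hx
        refine ⟨(p0, g0) :: pre, g, suf, by simp [heq], hle, ?_, by simp [hrest]⟩
        intro q hq
        rcases List.mem_cons.mp hq with rfl | hm
        · simpa using hng
        · exact hsmall q hm

-- addGap facts
theorem pvAddGap_memG (gaps : List (Int × Int)) : ∀ (lo hi i : Int),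
    pvMemG (pvAddGap gaps lo hi) i ↔ pvMemG gaps i ∨ (lo ≤ i ∧ i < hi) := by
  induction gaps with
  | nil => intro lo hi i; rw [pvAddGap, pvMemG_cons]; simp [pvMemG]
  | cons a t ih =>
    obtain ⟨p, g⟩ := a
    intro lo hi i
    rw [pvAddGap]
    split_ifs with hb1 hb2
    · rw [pvMemG_cons, ih, pvMemG_cons]
      tauto
    · rw [pvMemG_cons, pvMemG_cons]
      by_cases hm : pvMemG t i <;> (simp [hm]; try omega)
    · rw [ih, pvMemG_cons]
      by_cases hm : pvMemG t i <;> (simp [hm]; try omega)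

theorem pvAddGap_lb (gaps : List (Int × Int)) : ∀ (lo hi c : Int), c < lo →
    (∀ pg ∈ gaps, c < pg.1) → ∀ q ∈ pvAddGap gaps lo hi, c < q.1 := by
  induction gaps with
  | nil =>
    intro lo hi c h1 _ q hq
    simp [pvAddGap] at hq
    simp [hq]; omega
  | cons a t ih =>
    obtain ⟨p, g⟩ := a
    intro lo hi c h1 h2 q hq
    rw [pvAddGap] at hq
    split_ifs at hq with hb1 hb2
    · rcases List.mem_cons.mp hq with rfl | hm
      · exact h2 _ (by simp)
      · exact ih lo hi c h1 (fun pg hpg => h2 pg (by simp [hpg])) q hm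
    · rcases List.mem_cons.mp hq with rfl | hm
      · simpa using h1
      · exact h2 q hm
    · refine ih _ _ c (by have := h2 (p, g) (by simp); simp only at this; omega)
        (fun pg hpg => h2 pg (by simp [hpg])) q hq

theorem pvAddGap_WF {n : Int} {gaps : List (Int × Int)} : pvWFg n gaps →
    ∀ {lo hi : Int}, 0 ≤ lo → lo < hi → hi ≤ n →
    pvWFg n (pvAddGap gaps lo hi) := by
  induction gaps with
  | nil =>
    intro _ lo hi h0 h1 h2
    rw [pvAddGap]
    exact ⟨by simp, by intro pg hpg; simp at hpg; simp [hpg]; omega⟩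
  | cons a t ih =>
    obtain ⟨p, g⟩ := a
    intro hw lo hi h0 h1 h2
    have hwt : pvWFg n t := ⟨(List.pairwise_cons.mp hw.1).2, fun pg hpg => hw.2 pg (by simp [hpg])⟩
    have hbp := hw.2 (p, g) (by simp)
    simp only at hbp
    rw [pvAddGap]
    split_ifs with hb1 hb2
    · have hrec := ih hwt h0 h1 h2 (lo := lo) (hi := hi)
      constructor
      · rw [List.pairwise_cons]
        refine ⟨?_, hrec.1⟩
        exact pvAddGap_lb t lo hi (p + g) hb1 (fun pg hpg => (List.pairwise_cons.mp hw.1).1 pg hpg)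
      · intro pg hpg
        rcases List.mem_cons.mp hpg with rfl | hm
        · exact hbp
        · exact hrec.2 pg hm
    · constructor
      · rw [List.pairwise_cons]
        constructor
        · intro q hq
          rcases List.mem_cons.mp hq with rfl | hm
          · simp; omega
          · have := (List.pairwise_cons.mp hw.1).1 q hm
            simp; omega
        · exact hw.1
      · intro pg hpg
        rcases List.mem_cons.mp hpg with rfl | hm
        · simp; omega
        · exact hw.2 pg hm
    · exact ih hwt (by omega) (by omega) (by have := hbp; omega)

-- a blank window lies inside a single free gap
theorem pvWindow_in_gap {n : Nat} {state : List String} {gaps : List (Int × Int)}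
    (hw : pvWFg (n : Int) gaps)
    (hmem : ∀ i : Nat, i < n → (state.getD i "" = "_" ↔ pvMemG gaps (i : Int)))
    {j L : Nat} (hL : 1 ≤ L) (hjL : j + L ≤ n)
    (hblank : ∀ k < L, state.getD (j + k) "" = "_") :
    ∃ q h', (q, h') ∈ gaps ∧ q ≤ (j : Int) ∧ (j : Int) + L ≤ q + h' := by
  have hj0 : pvMemG gaps (j : Int) := (hmem j (by omega)).mp (by simpa using hblank 0 hL)
  obtain ⟨⟨q, h'⟩, hq, hq1, hq2⟩ := hj0
  simp only at hq1 hq2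
  refine ⟨q, h', hq, hq1, ?_⟩
  have key : ∀ k, k < L → ((j + k : Nat) : Int) < q + h' := by
    intro k
    induction k with
    | zero => intro _; simpa using hq2
    | succ m ihm =>
      intro hk
      have hm := ihm (by omega)
      have hmem2 : pvMemG gaps (((j + m : Nat) : Int) + 1) := by
        have h1 := (hmem (j + m + 1) (by omega)).mp (by
          have := hblank (m + 1) hk
          rwa [show j + (m + 1) = j + m + 1 by omega] at this)
        rwa [show (((j + m : Nat) : Int) + 1) = ((j + m + 1 : Nat) : Int) by push_cast; ring]
      have := pvSucc_same_gap hw hq (by push_cast; omega) hm hmem2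
      push_cast at this ⊢
      omega
  have := key (L - 1) (by omega)
  push_cast at this ⊢
  omega

-- the two searches agree
theorem pvFind_eq {n : Nat} {state : List String} {gaps : List (Int × Int)}
    (hlen : state.length = n) (hw : pvWFg (n : Int) gaps)
    (hmem : ∀ i : Nat, i < n → (state.getD i "" = "_" ↔ pvMemG gaps (i : Int)))
    (L : Nat) (hL : 1 ≤ L) :
    pvFindA state (L : Int) = (pvPopFit gaps (L : Int)).map (fun r => r.1) := by
  rw [pvFindA_eq_specFind state L hL]
  cases hp : pvPopFit gaps (L : Int) with
  | none =>
    cases hs : pvSpecFind state L with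
    | none => simp
    | some j =>
      exfalso
      obtain ⟨hjL, hwin, -⟩ := pvSpecFind_some state L j hs
      rw [hlen] at hjL
      have hblank := (pvWin_iff state j L (by omega)).mp hwin
      obtain ⟨q, h', hq, hqj, hfit⟩ := pvWindow_in_gap hw hmem hL hjL hblank
      have := pvPopFit_none hp (q, h') hq
      simp only at this
      omega
  | some r =>
    obtain ⟨p, rest⟩ := r
    obtain ⟨pre, g, suf, heq, hLg, hpre, -⟩ := pvPopFit_some hp
    have hbp := hw.2 (p, g) (by rw [heq]; simp)
    simp only at hbp
    obtain ⟨hp0, hg1, hpgn⟩ := hbp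
    have hpN : ((p.toNat : Nat) : Int) = p := Int.toNat_of_nonneg hp0
    have hwinp : ∀ k < L, state.getD (p.toNat + k) "" = "_" := by
      intro k hk
      refine (hmem (p.toNat + k) (by omega)).mpr ?_
      exact ⟨(p, g), by rw [heq]; simp, by push_cast [hpN]; omega, by push_cast [hpN]; omega⟩
    have hfits : p.toNat + L ≤ state.length ∧
        (((state.drop p.toNat).take L).all (· == "_")) = true := by
      refine ⟨by omega, ?_⟩
      exact (pvWin_iff state p.toNat L (by omega)).mpr hwinp
    cases hs : pvSpecFind state L with
    | none =>
      exact absurd hfits.2 (pvSpecFind_none state L hL hs p.toNat hfits.1)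
    | some j =>
      obtain ⟨hjL, hwin, hmin⟩ := pvSpecFind_some state L j hs
      have hjp : j ≤ p.toNat := by
        by_contra hlt
        exact hmin p.toNat (by omega) hfits
      rw [hlen] at hjL
      obtain ⟨q, h', hq, hqj, hfit⟩ :=
        pvWindow_in_gap hw hmem hL hjL ((pvWin_iff state j L (by rw [hlen]; omega)).mp hwin)
      rw [heq] at hq
      rcases List.mem_append.mp hq with hqpre | hqmid
      · have := hpre _ hqpre
        simp only at this
        omega
      · rcases List.mem_cons.mp hqmid with hqe | hqsuf
        · have hqp : q = p := by rw [Prod.mk.injEq] at hqe; exact hqe.1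
          have : j = p.toNat := by omega
          simp [this, hpN]
        · have hrel : p + g < q := by
            have hpw := hw.1
            rw [heq] at hpw
            have := (List.pairwise_append.mp hpw).2.1
            have h2 := (List.pairwise_cons.mp this).1 (q, h') hqsuf
            simpa using h2
          omega

-- parse: B's runs equal A's file list, and establish the initial invariant
theorem pvRunB_eq (t : List String) (c : String) : pvRunB t c = pvCountRun t c := by
  induction t with
  | nil => rfl
  | cons x t ih =>
    by_cases hx : x == c
    · simp [pvRunB, pvCountRun, hx] at ih ⊢
      omega
    · simp [pvRunB, pvCountRun, hx]

theorem pvParseA_skip_under (t : List String) (pos : Int) :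
    pvParseA (t.drop (pvCountRun t "_")) (pos + (pvCountRun t "_" : Int)) = pvParseA t pos := by
  induction t generalizing pos with
  | nil => simp [pvCountRun]
  | cons c t ih =>
    by_cases hc : c == "_"
    · have hcc : c = "_" := by simpa using hc
      rw [show pvCountRun (c :: t) "_" = 1 + pvCountRun t "_" by simp [pvCountRun, hc]]
      rw [show pvParseA (c :: t) pos = pvParseA t (pos + 1) by rw [pvParseA]; simp [hc]]
      rw [← ih (pos + 1)]
      congr 1
      · rw [Nat.add_comm, List.drop_succ_cons]
      · push_cast; ring
    · rw [show pvCountRun (c :: t) "_" = 0 by simp [pvCountRun, hc]]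
      simp

theorem pvCountRun_le (l : List String) (f : String) : pvCountRun l f ≤ l.length := by
  induction l with
  | nil => simp [pvCountRun]
  | cons c t ih => simp only [pvCountRun, List.length_cons]; split <;> omega

theorem pvRun_drop (t : List String) (c : String) :
    t.drop (pvRunB t c) = t.dropWhile (fun x => x == c) := by
  unfold pvRunB
  nth_rewrite 2 [← List.takeWhile_append_dropWhile (p := fun x => x == c) (l := t)]
  rw [List.drop_left]

theorem pvRun_le (t : List String) (c : String) : pvRunB t c ≤ t.length :=
  (List.takeWhile_prefix _).length_le

theorem pvRun_sat (t : List String) (c : String) (i : Nat) (h : i < pvRunB t c) :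
    t.getD i "" = c := by
  unfold pvRunB at h
  have hle : i < t.length := lt_of_lt_of_le h (List.takeWhile_prefix _).length_le
  have h1 := (List.takeWhile_prefix (l := t) (fun x => x == c)).getElem h
  have h2 := List.mem_takeWhile_imp (List.getElem_mem h)
  rw [h1] at h2
  rw [List.getD_eq_getElem _ _ hle]
  simpa using h2

theorem pvRun_head (t : List String) (c : String) (h : pvRunB t c < t.length) :
    t.getD (pvRunB t c) "" ≠ c := by
  have hd := pvRun_drop t c
  have hne : t.dropWhile (fun x => x == c) ≠ [] := by
    rw [← hd]
    intro hbad
    have := congrArg List.length hbad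
    simp at this
    omega
  have hh := List.head?_dropWhile_not (fun x => x == c) t
  obtain ⟨a, l', hx⟩ := List.exists_cons_of_ne_nil hne
  rw [hx] at hh
  simp only [List.head?_cons] at hh
  have hget : t.getD (pvRunB t c) "" = a := by
    rw [List.getD_eq_getElem?_getD, show t[pvRunB t c]? = (t.drop (pvRunB t c))[0]? by
          rw [List.getElem?_drop]; norm_num, hd, hx]
    rfl
  rw [hget]
  simpa using hh

theorem pvParseB_fst (l : List String) : ∀ (m : Int), (pvParseB l m).1 = pvParseA l m := by
  induction hn : l.length using Nat.strong_induction_on generalizing l with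
  | _ n ihn =>
  cases l with
  | nil => intro m; simp [pvParseB, pvParseA]
  | cons c t =>
    subst hn
    intro m
    rw [pvParseB, pvParseA, pvRunB_eq]
    have hle := pvCountRun_le t c
    have hlt : (t.drop (pvCountRun t c)).length < (c :: t).length := by
      simp only [List.length_drop, List.length_cons]; omega
    by_cases hc : c == "_"
    · have hcc : c = "_" := by simpa using hc
      simp only [hc, if_true]
      subst hcc
      rw [ihn _ hlt _ rfl]
      rw [show m + ((1 + pvCountRun t "_" : Nat) : Int)
            = (m + 1) + (pvCountRun t "_" : Int) by push_cast; ring]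
      exact pvParseA_skip_under t (m + 1)
    · simp only [hc, Bool.false_eq_true, if_false]
      rw [ihn _ hlt _ rfl]

theorem pvParseB_nil (m : Int) : pvParseB [] m = ([], []) := by simp [pvParseB]

theorem pvParse_inv (l : List String) : ∀ (m : Nat),
    (∀ t ∈ (pvParseB l (m : Int)).1, t.1 ≠ "_" ∧ ∃ s L : Nat, t.2.1 = ((m + s : Nat) : Int) ∧
        t.2.2 = (L : Int) ∧ 1 ≤ L ∧ s + L ≤ l.length ∧
        ∀ k : Nat, s ≤ k → k < s + L → l.getD k "" = t.1) ∧
    List.Pairwise (fun a b => a.2.1 + a.2.2 ≤ b.2.1) (pvParseB l (m : Int)).1 ∧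
    List.Pairwise (fun (a b : Int × Int) => a.1 + a.2 < b.1) (pvParseB l (m : Int)).2 ∧
    (∀ pg ∈ (pvParseB l (m : Int)).2, (m : Int) ≤ pg.1 ∧ 1 ≤ pg.2 ∧
        pg.1 + pg.2 ≤ (m : Int) + l.length) ∧
    (∀ k : Nat, k < l.length → (l.getD k "" = "_" ↔ pvMemG (pvParseB l (m : Int)).2 ((m + k : Nat) : Int))) ∧
    (∀ k : Nat, k < l.length → l.getD k "" ≠ "_" →
        ∃ t ∈ (pvParseB l (m : Int)).1, pvCovers t ((m + k : Nat) : Int)) ∧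
    (l.getD 0 "" ≠ "_" → ∀ pg ∈ (pvParseB l (m : Int)).2, (m : Int) + 1 ≤ pg.1) := by
  induction hn : l.length using Nat.strong_induction_on generalizing l with
  | _ n ihn =>
  cases l with
  | nil =>
    intro m
    have h0 : n = 0 := by simpa using hn.symm
    subst h0
    rw [pvParseB_nil]
    refine ⟨by simp, by simp, by simp, by simp, by omega, by omega, by simp⟩
  | cons c t =>
    subst hn
    intro m
    have hr_le : pvRunB t c ≤ t.length := pvRun_le t c
    have hlen' : (t.drop (pvRunB t c)).length = t.length - pvRunB t c := by simp
    have hlt : (t.drop (pvRunB t c)).length < (c :: t).length := by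
      simp only [List.length_cons]; omega
    have IH := ihn _ hlt (t.drop (pvRunB t c)) rfl (m + (1 + pvRunB t c))
    set r := pvRunB t c with hr
    set l' := t.drop r with hl'
    have hcast : ((m + (1 + r) : Nat) : Int) = (m : Int) + ((1 + r : Nat) : Int) := by push_cast; ring
    rw [hcast] at IH
    have hF1 : ∀ i : Nat, i < 1 + r → (c :: t).getD i "" = c := by
      intro i hi
      cases i with
      | zero => rfl
      | succ i' => exact pvRun_sat t c i' (by omega)
    have hF3 : ∀ k' : Nat, (c :: t).getD (1 + r + k') "" = l'.getD k' "" := by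
      intro k'
      rw [show 1 + r + k' = (r + k') + 1 by omega, List.getD_cons_succ,
          List.getD_eq_getElem?_getD, List.getD_eq_getElem?_getD, hl', List.getElem?_drop]
    have hmax : l' ≠ [] → l'.getD 0 "" ≠ c := by
      intro hne
      have hrlt : r < t.length := by
        by_contra hge
        exact hne (by rw [hl', List.drop_eq_nil_iff.mpr (by omega)])
      have := pvRun_head t c (by omega)
      rwa [show t.getD r "" = l'.getD 0 "" by
        rw [List.getD_eq_getElem?_getD, List.getD_eq_getElem?_getD, hl', List.getElem?_drop]
        norm_num] at this
    rw [pvParseB]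
    simp only [← hr, ← hl']
    obtain ⟨IH1, IH2, IH3, IH4, IH5, IH6, IH7⟩ := IH
    by_cases hc : c == "_"
    · have hcc : c = "_" := by simpa using hc
      simp only [hc, if_true]
      refine ⟨?_, IH2, ?_, ?_, ?_, ?_, ?_⟩
      · -- C1 files
        intro tr htr
        obtain ⟨hne, s, L, h1, h2, h3, h4, h5⟩ := IH1 tr htr
        refine ⟨hne, (1 + r) + s, L, by rw [h1]; push_cast; ring, h2, h3,
          by simp only [List.length_cons]; omega, ?_⟩
        intro k hk1 hk2
        rw [show k = 1 + r + (k - (1 + r)) by omega, hF3]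
        exact h5 (k - (1 + r)) (by omega) (by omega)
      · -- C3 gap pairwise
        rw [List.pairwise_cons]
        refine ⟨?_, IH3⟩
        intro pg hpg
        simp only
        by_cases hl'e : l' = []
        · rw [hl'e, pvParseB_nil] at hpg
          simp at hpg
        · have hh : l'.getD 0 "" ≠ "_" := by rw [← hcc]; exact hmax hl'e
          have := IH7 hh pg hpg
          push_cast at this ⊢
          omega
      · -- C4 gap bounds
        intro pg hpg
        rcases List.mem_cons.mp hpg with rfl | hm
        · simp only [List.length_cons]
          push_cast
          omega
        · have := IH4 pg hm
          simp only [List.length_cons]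
          push_cast at this ⊢
          omega
      · -- C5 blank iff
        intro k hk
        by_cases hk1 : k < 1 + r
        · rw [hF1 k hk1, hcc]
          simp only [pvMemG_cons]
          constructor
          · intro _; left; constructor <;> push_cast <;> omega
          · intro _; trivial
        · rw [show k = 1 + r + (k - (1 + r)) by omega, hF3]
          have hkl : k - (1 + r) < l'.length := by
            simp only [List.length_cons] at hk
            omega
          rw [IH5 (k - (1 + r)) hkl, pvMemG_cons]
          have hpos : (((m + (1 + r)) + (k - (1 + r)) : Nat) : Int) = ((m + (1 + r + (k - (1 + r))) : Nat) : Int) := by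
            push_cast; ring
          rw [hpos]
          constructor
          · intro h; right; exact h
          · rintro (h | h)
            · exfalso; push_cast at h; omega
            · exact h
      · -- C6 coverage
        intro k hk hne
        by_cases hk1 : k < 1 + r
        · exact absurd (by rw [hF1 k hk1, hcc]) hne
        · rw [show k = 1 + r + (k - (1 + r)) by omega, hF3] at hne
          have hkl : k - (1 + r) < l'.length := by
            simp only [List.length_cons] at hk
            omega
          obtain ⟨tr, htr, hcov⟩ := IH6 (k - (1 + r)) hkl hne
          refine ⟨tr, htr, ?_⟩
          rwa [show m + (1 + r) + (k - (1 + r)) = m + k by omega] at hcov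
      · -- C7
        intro hne
        exact absurd (by rw [List.getD_cons_zero, hcc]) hne
    · have hcc : c ≠ "_" := by simpa using hc
      simp only [hc, Bool.false_eq_true, if_false]
      have hstarts : ∀ pg ∈ (pvParseB l' ((m : Int) + ((1 + r : Nat) : Int))).2,
          (m : Int) + ((1 + r : Nat) : Int) ≤ pg.1 := fun pg hpg => (IH4 pg hpg).1
      refine ⟨?_, ?_, IH3, ?_, ?_, ?_, ?_⟩
      · -- C1 files
        intro tr htr
        rcases List.mem_cons.mp htr with rfl | hm
        · refine ⟨hcc, 0, 1 + r, by push_cast; ring, by norm_num, by omega, by simp; omega, ?_⟩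
          intro k hk1 hk2
          exact hF1 k (by omega)
        · obtain ⟨hne, s, L, h1, h2, h3, h4, h5⟩ := IH1 tr hm
          refine ⟨hne, (1 + r) + s, L, by rw [h1]; push_cast; ring, h2, h3,
          by simp only [List.length_cons]; omega, ?_⟩
          intro k hk1 hk2
          rw [show k = 1 + r + (k - (1 + r)) by omega, hF3]
          exact h5 (k - (1 + r)) (by omega) (by omega)
      · -- C2 file pairwise
        rw [List.pairwise_cons]
        refine ⟨?_, IH2⟩
        intro tr htr
        obtain ⟨-, s, L, h1, -, -, -, -⟩ := IH1 tr htr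
        simp only
        rw [h1]
        push_cast
        omega
      · -- C4 gap bounds
        intro pg hpg
        have := IH4 pg hpg
        simp only [List.length_cons]
        push_cast at this ⊢
        omega
      · -- C5 blank iff
        intro k hk
        by_cases hk1 : k < 1 + r
        · rw [hF1 k hk1]
          constructor
          · intro h; exact absurd h hcc
          · rintro ⟨pg, hpg, h1, h2⟩
            have := hstarts pg hpg
            push_cast at this h1 h2
            omega
        · rw [show k = 1 + r + (k - (1 + r)) by omega, hF3]
          have hkl : k - (1 + r) < l'.length := by
            simp only [List.length_cons] at hk
            omega
          rw [IH5 (k - (1 + r)) hkl]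
          rw [show (((m + (1 + r)) + (k - (1 + r)) : Nat) : Int) = ((m + (1 + r + (k - (1 + r))) : Nat) : Int) by push_cast; ring]
      · -- C6 coverage
        intro k hk hne
        by_cases hk1 : k < 1 + r
        · refine ⟨(c, (m : Int), ((1 + r : Nat) : Int)), by simp, ?_⟩
          unfold pvCovers
          simp only
          push_cast
          omega
        · rw [show k = 1 + r + (k - (1 + r)) by omega, hF3] at hne
          have hkl : k - (1 + r) < l'.length := by
            simp only [List.length_cons] at hk
            omega
          obtain ⟨tr, htr, hcov⟩ := IH6 (k - (1 + r)) hkl hne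
          refine ⟨tr, List.mem_cons_of_mem _ htr, ?_⟩
          rwa [show m + (1 + r) + (k - (1 + r)) = m + k by omega] at hcov
      · -- C7
        intro _ pg hpg
        have := hstarts pg hpg
        push_cast at this ⊢
        omega

-- popFit preserves well-formedness and removes exactly the used window
theorem pvPopFit_WF {n : Int} {gaps : List (Int × Int)} (hw : pvWFg n gaps)
    {L p : Int} {rest : List (Int × Int)} (hL : 0 < L)
    (h : pvPopFit gaps L = some (p, rest)) : pvWFg n rest := by
  obtain ⟨pre, g, suf, heq, hLg, -, hrest⟩ := pvPopFit_some h
  subst heq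
  obtain ⟨hpw, hbd⟩ := hw
  obtain ⟨hpre, hmidsuf, hcross⟩ := List.pairwise_append.mp hpw
  obtain ⟨hpg_suf, hsuf⟩ := List.pairwise_cons.mp hmidsuf
  have hbpg := hbd (p, g) (by simp)
  simp only at hbpg
  constructor
  · subst hrest
    rw [List.pairwise_append]
    refine ⟨?_, hsuf, ?_⟩
    · rw [List.pairwise_append]
      refine ⟨hpre, by split <;> simp, ?_⟩
      intro a ha b hb
      split at hb
      · simp at hb
        have := hcross a ha (p, g) (by simp)
        simp [hb]
        simp only at this
        omega
      · simp at hb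
    · intro a ha b hb
      rcases List.mem_append.mp ha with ham | hamid
      · exact hcross a ham b (by simp [hb])
      · split at hamid
        · simp at hamid
          have := hpg_suf b hb
          simp [hamid]
          simp only at this
          omega
        · simp at hamid
  · subst hrest
    intro pg hpg
    rcases List.mem_append.mp hpg with hm | hs
    · rcases List.mem_append.mp hm with hm1 | hm2
      · exact hbd pg (by simp [hm1])
      · split at hm2
        · simp at hm2
          simp [hm2]
          omega
        · simp at hm2
    · exact hbd pg (by simp [hs])

theorem pvPopFit_memG {n : Int} {gaps : List (Int × Int)} (hw : pvWFg n gaps)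
    {L p : Int} {rest : List (Int × Int)} (hL : 0 < L)
    (h : pvPopFit gaps L = some (p, rest)) (i : Int) :
    pvMemG rest i ↔ (pvMemG gaps i ∧ ¬(p ≤ i ∧ i < p + L)) := by
  obtain ⟨pre, g, suf, heq, hLg, -, hrest⟩ := pvPopFit_some h
  have hbpg := hw.2 (p, g) (by rw [heq]; simp)
  simp only at hbpg
  have hother : ∀ q ∈ pre ++ suf, q.1 ≤ i → i < q.1 + q.2 → ¬(p ≤ i ∧ i < p + L) := by
    intro q hq h1 h2 hbad
    have hqg : q ∈ pre ++ (p, g) :: suf := by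
      rcases List.mem_append.mp hq with h | h
      · simp [h]
      · simp [h]
    have hrel : q.1 + q.2 < p ∨ p + g < q.1 := by
      obtain ⟨hpw, -⟩ := hw
      rw [heq] at hpw
      obtain ⟨hpre, hmidsuf, hcross⟩ := List.pairwise_append.mp hpw
      rcases List.mem_append.mp hq with hm | hs
      · left; have := hcross q hm (p, g) (by simp); simpa using this
      · right; have := (List.pairwise_cons.mp hmidsuf).1 q hs; simpa using this
    omega
  constructor
  · intro ⟨q, hq, h1, h2⟩
    subst hrest
    rcases List.mem_append.mp hq with hm | hs
    · rcases List.mem_append.mp hm with hm1 | hm2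
      · exact ⟨⟨q, by rw [heq]; simp [hm1], h1, h2⟩,
          hother q (by simp [hm1]) h1 h2⟩
      · split at hm2
        · simp at hm2
          subst hm2
          simp only at h1 h2
          refine ⟨⟨(p, g), by rw [heq]; simp, by simp; omega, by simp; omega⟩, by omega⟩
        · simp at hm2
    · exact ⟨⟨q, by rw [heq]; simp [hs], h1, h2⟩, hother q (by simp [hs]) h1 h2⟩
  · intro ⟨⟨q, hq, h1, h2⟩, hnot⟩
    subst hrest
    rw [heq] at hq
    rcases List.mem_append.mp hq with hm | hms
    · exact ⟨q, by simp [hm], h1, h2⟩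
    · rcases List.mem_cons.mp hms with rfl | hs
      · simp only at h1 h2
        have hLlt : L < g := by omega
        refine ⟨(p + L, g - L), ?_, by simp; omega, by simp; omega⟩
        simp [hLlt]
      · exact ⟨q, by simp [hs], h1, h2⟩

-- render
theorem pvRenderFold_len (pl : List (String × Int × Int)) (out : List String)
    (hb : ∀ t ∈ pl, ∃ s L : Nat, t.2.1 = (s : Int) ∧ t.2.2 = (L : Int) ∧ s + L ≤ out.length) :
    (pl.foldl (fun o x => pvSplice o x.2.1 x.2.2 x.1) out).length = out.length := by
  induction pl generalizing out with
  | nil => rfl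
  | cons x pl ih =>
    obtain ⟨s, L, h1, h2, h3⟩ := hb x (by simp)
    simp only [List.foldl_cons]
    rw [show pvSplice out x.2.1 x.2.2 x.1 = pvSplice out (s : Int) (L : Int) x.1 by rw [h1, h2]]
    rw [ih (pvSplice out (s : Int) (L : Int) x.1) ?_, pvSplice_len out s L x.1 h3]
    intro t ht
    obtain ⟨s', L', g1, g2, g3⟩ := hb t (by simp [ht])
    exact ⟨s', L', g1, g2, by rw [pvSplice_len out s L x.1 h3]; exact g3⟩

theorem pvRenderFold_getD (pl : List (String × Int × Int)) : ∀ (out : List String),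
    (∀ t ∈ pl, ∃ s L : Nat, t.2.1 = (s : Int) ∧ t.2.2 = (L : Int) ∧ s + L ≤ out.length) →
    ∀ i : Nat,
    (∃ t ∈ pl, pvCovers t (i : Int) ∧ (pl.foldl (fun o x => pvSplice o x.2.1 x.2.2 x.1) out).getD i "" = t.1) ∨
    ((∀ t ∈ pl, ¬pvCovers t (i : Int)) ∧ (pl.foldl (fun o x => pvSplice o x.2.1 x.2.2 x.1) out).getD i "" = out.getD i "") := by
  induction pl with
  | nil => intro out _ i; right; exact ⟨by simp, rfl⟩
  | cons x pl ih =>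
    intro out hb i
    obtain ⟨s, L, h1, h2, h3⟩ := hb x (by simp)
    simp only [List.foldl_cons]
    rw [show pvSplice out x.2.1 x.2.2 x.1 = pvSplice out (s : Int) (L : Int) x.1 by rw [h1, h2]]
    set out' := pvSplice out (s : Int) (L : Int) x.1 with hout'
    have hlen' : out'.length = out.length := pvSplice_len out s L x.1 h3
    have hb' : ∀ t ∈ pl, ∃ s' L' : Nat, t.2.1 = (s' : Int) ∧ t.2.2 = (L' : Int) ∧ s' + L' ≤ out'.length := by
      intro t ht
      obtain ⟨s', L', g1, g2, g3⟩ := hb t (by simp [ht])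
      exact ⟨s', L', g1, g2, by omega⟩
    have hcov_iff : pvCovers x (i : Int) ↔ (s ≤ i ∧ i < s + L) := by
      unfold pvCovers
      rw [h1, h2]
      constructor <;> intro hh <;> push_cast at hh ⊢ <;> omega
    rcases ih out' hb' i with ⟨t, ht, hcov, hval⟩ | ⟨hnone, hval⟩
    · exact Or.inl ⟨t, by simp [ht], hcov, hval⟩
    · by_cases hx : s ≤ i ∧ i < s + L
      · left
        refine ⟨x, by simp, hcov_iff.mpr hx, ?_⟩
        rw [hval, hout', pvSplice_getD out s L x.1 h3 i, if_pos hx]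
      · right
        refine ⟨?_, ?_⟩
        · intro t ht
          rcases List.mem_cons.mp ht with rfl | hm
          · exact fun hc => hx (hcov_iff.mp hc)
          · exact hnone t hm
        · rw [hval, hout', pvSplice_getD out s L x.1 h3 i, if_neg hx]

theorem pvRender_eq (n : Nat) (state : List String) (pl : List (String × Int × Int))
    (hlen : state.length = n) (hocc : ∀ t ∈ pl, pvOcc state t)
    (hcov : ∀ i : Nat, i < n → state.getD i "" ≠ "_" → ∃ t ∈ pl, pvCovers t (i : Int)) :
    pvRender n pl = state := by
  have hb : ∀ t ∈ pl, ∃ s L : Nat, t.2.1 = (s : Int) ∧ t.2.2 = (L : Int) ∧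
      s + L ≤ (List.replicate n "_" : List String).length := by
    intro t ht
    obtain ⟨-, s, L, h1, h2, -, h4, -⟩ := hocc t ht
    exact ⟨s, L, h1, h2, by simp; omega⟩
  have hlenr : (pvRender n pl).length = n := by
    unfold pvRender
    rw [pvRenderFold_len pl _ hb]
    simp
  apply List.ext_getElem (by omega)
  intro i hi1 hi2
  rw [← List.getD_eq_getElem _ "" hi1, ← List.getD_eq_getElem _ "" hi2]
  have hin : i < n := by omega
  rcases pvRenderFold_getD pl (List.replicate n "_") hb i with ⟨t, ht, hcv, hval⟩ | ⟨hnone, hval⟩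
  · unfold pvRender
    rw [hval]
    obtain ⟨-, s, L, h1, h2, -, h4, h5⟩ := hocc t ht
    unfold pvCovers at hcv
    rw [h1, h2] at hcv
    exact (h5 i (by omega) (by omega)).symm
  · unfold pvRender
    rw [hval, List.getD_eq_getElem _ "" (by simp; omega), List.getElem_replicate]
    by_contra hne
    obtain ⟨t, ht, hcv⟩ := hcov i hin (fun hh => hne (by rw [hh]))
    exact hnone t ht hcv

theorem pvDisj_symm : ∀ {a b : String × Int × Int}, pvDisj a b → pvDisj b a :=
  fun h i hc => h i ⟨hc.2, hc.1⟩

-- one simulation step preserves the invariant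
theorem pvStep_inv {n : Nat} {state : List String} {gaps : List (Int × Int)}
    {pl rem : List (String × Int × Int)} {h : String × Int × Int}
    (hinv : pvInv n state gaps pl (h :: rem)) :
    pvInv n (pvStepA state h) (pvStepB (gaps, pl) h).1 ((pvStepB (gaps, pl) h).2) rem := by
  obtain ⟨f, s, L⟩ := h
  obtain ⟨H1, Hw, H2, H4, H6, H7⟩ := hinv
  obtain ⟨hf, sN, LN, hs, hL, hL1, hsLn, hocch⟩ := H4 (f, s, L) (by simp)
  simp only at hs hL
  subst hs
  subst hL
  rw [H1] at hsLn
  have H7' : List.Pairwise pvDisj ((f, (sN : Int), (LN : Int)) :: (pl ++ rem)) :=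
    (List.pairwise_middle (by intro a b hab; exact pvDisj_symm hab)).mp H7
  obtain ⟨Hds, H7r⟩ := List.pairwise_cons.mp H7'
  have hassoc : ∀ x : String × Int × Int, (pl ++ [x]) ++ rem = pl ++ x :: rem := by
    intro x; simp
  have hfind := pvFind_eq H1 Hw H2 LN hL1
  unfold pvStepA pvStepB
  simp only [hfind]
  have hskip : pvInv n state gaps (pl ++ [(f, (sN : Int), (LN : Int))]) rem := by
    refine ⟨H1, Hw, H2, ?_, ?_, ?_⟩
    · rw [hassoc]; exact H4
    · rw [hassoc]; exact H6
    · rw [hassoc]; exact H7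
  cases hp : pvPopFit gaps ((LN : Nat) : Int) with
  | none => exact hskip
  | some r =>
    obtain ⟨p, rest⟩ := r
    simp only [Option.map_some]
    by_cases hps : p < (sN : Int)
    case neg =>
      simp only [if_neg hps]
      exact hskip
    case pos =>
      simp only [if_pos hps]
      show pvInv n (pvPlace (pvClear state ((sN : Nat) : Int) (((sN : Nat) : Int) + ((LN : Nat) : Int))) p f ((LN : Nat) : Int))
        (pvAddGap rest ((sN : Nat) : Int) (((sN : Nat) : Int) + ((LN : Nat) : Int)))
        (pl ++ [(f, p, ((LN : Nat) : Int))]) rem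
      -- the move: A splices twice, B pops the gap and re-inserts the freed span
      obtain ⟨pre, g, suf, heq, hLg, -, -⟩ := pvPopFit_some hp
      have hbpg := Hw.2 (p, g) (by rw [heq]; simp)
      simp only at hbpg
      have hp0 : 0 ≤ p := hbpg.1
      have hpN : ((p.toNat : Nat) : Int) = p := Int.toNat_of_nonneg hp0
      set pN := p.toNat with hpNdef
      have hpn_le : pN + LN ≤ n := by omega
      have hblankp : ∀ i : Nat, pN ≤ i → i < pN + LN → state.getD i "" = "_" := by
        intro i h1 h2
        refine (H2 i (by omega)).mpr ⟨(p, g), by rw [heq]; simp, by simp; omega, by simp; omega⟩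
      have hdisjw : ∀ i : Nat, pN ≤ i → i < pN + LN → ¬(sN ≤ i ∧ i < sN + LN) := by
        intro i h1 h2 ⟨h3, h4⟩
        exact hf (by rw [← hocch i h3 h4, hblankp i h1 h2])
      have hclear : pvClear state (sN : Int) ((sN : Int) + (LN : Int))
          = pvSplice state (sN : Int) (LN : Int) "_" :=
        pvClear_eq_splice state sN LN (by omega)
      set st1 := pvSplice state (sN : Int) (LN : Int) "_" with hst1
      have hlen1 : st1.length = n := by rw [hst1, pvSplice_len state sN LN _ (by omega)]; omega
      have hplace : pvPlace st1 p f (LN : Int) = pvSplice st1 (pN : Int) (LN : Int) f := by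
        rw [← hpN]
        exact pvPlace_eq_splice st1 pN LN f (by omega)
      set st2 := pvSplice st1 (pN : Int) (LN : Int) f with hst2
      have hlen2 : st2.length = n := by rw [hst2, pvSplice_len st1 pN LN _ (by omega)]; omega
      have hget1 : ∀ i : Nat, st1.getD i "" = if sN ≤ i ∧ i < sN + LN then "_" else state.getD i "" :=
        fun i => pvSplice_getD state sN LN _ (by omega) i
      have hget2 : ∀ i : Nat, st2.getD i "" = if pN ≤ i ∧ i < pN + LN then f else st1.getD i "" :=
        fun i => pvSplice_getD st1 pN LN _ (by omega) i
      have hrestmem := fun i => pvPopFit_memG Hw (by exact_mod_cast hL1) hp i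
      have hWrest := pvPopFit_WF Hw (L := (LN : Int)) (by exact_mod_cast hL1) hp
      rw [hclear, hplace]
      refine ⟨hlen2, ?_, ?_, ?_, ?_, ?_⟩
      · -- well-formedness of the new gap list
        exact pvAddGap_WF hWrest (lo := ((sN : Nat) : Int)) (hi := ((sN : Nat) : Int) + ((LN : Nat) : Int))
          (by push_cast; omega) (by push_cast; omega) (by push_cast; omega)
      · -- blank-iff
        intro i hi
        rw [hget2 i, hget1 i, pvAddGap_memG, hrestmem]
        by_cases hip : pN ≤ i ∧ i < pN + LN
        · rw [if_pos hip]
          refine iff_of_false hf ?_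
          rintro (⟨-, hnp⟩ | hsw)
          · exact hnp ⟨by push_cast; omega, by push_cast; omega⟩
          · exact hdisjw i hip.1 hip.2 ⟨by exact_mod_cast hsw.1, by push_cast at hsw; omega⟩
        · rw [if_neg hip]
          by_cases his : sN ≤ i ∧ i < sN + LN
          · rw [if_pos his]
            exact iff_of_true rfl (Or.inr ⟨by push_cast; omega, by push_cast; omega⟩)
          · rw [if_neg his, H2 i hi]
            constructor
            · intro hm
              exact Or.inl ⟨hm, by push_cast; omega⟩
            · rintro (⟨hm, -⟩ | hsw)
              · exact hm
              · exact absurd ⟨by exact_mod_cast hsw.1, by push_cast at hsw; omega⟩ his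
      · -- occupancy
        intro t ht
        rw [hassoc] at ht
        have hmem_old : t ∈ pl ++ rem → pvOcc st2 t := by
          intro hmo
          have hold : pvOcc state t := by
            refine H4 t ?_
            rcases List.mem_append.mp hmo with hm | hm
            · exact List.mem_append.mpr (Or.inl hm)
            · exact List.mem_append.mpr (Or.inr (by simp [hm]))
          obtain ⟨ht1, sT, LT, e1, e2, e3, e4, e5⟩ := hold
          refine ⟨ht1, sT, LT, e1, e2, e3, by omega, ?_⟩
          intro i h1 h2
          have hdt := Hds t hmo
          have hcovt : pvCovers t (i : Int) := by
            unfold pvCovers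
            rw [e1, e2]
            constructor <;> push_cast <;> omega
          have hnsw : ¬(sN ≤ i ∧ i < sN + LN) := by
            intro hsw
            exact hdt (i : Int) ⟨⟨by push_cast; omega, by push_cast; omega⟩, hcovt⟩
          have hnpw : ¬(pN ≤ i ∧ i < pN + LN) := by
            intro hpw
            have := e5 i h1 h2
            rw [hblankp i hpw.1 hpw.2] at this
            exact ht1 this.symm
          rw [hget2 i, if_neg hnpw, hget1 i, if_neg hnsw]
          exact e5 i h1 h2
        rcases List.mem_append.mp ht with hm | hm
        · exact hmem_old (List.mem_append.mpr (Or.inl hm))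
        · rcases List.mem_cons.mp hm with rfl | hm2
          · refine ⟨hf, pN, LN, hpN.symm, rfl, hL1, by omega, ?_⟩
            intro i h1 h2
            rw [hget2 i, if_pos ⟨h1, h2⟩]
          · exact hmem_old (List.mem_append.mpr (Or.inr hm2))
      · -- coverage
        intro i hi hne
        rw [hassoc]
        by_cases hip : pN ≤ i ∧ i < pN + LN
        · refine ⟨(f, p, ((LN : Nat) : Int)), by simp, ?_⟩
          exact ⟨by push_cast; omega, by push_cast; omega⟩
        · rw [hget2 i, if_neg hip, hget1 i] at hne
          by_cases his : sN ≤ i ∧ i < sN + LN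
          · rw [if_pos his] at hne
            exact absurd rfl hne
          · rw [if_neg his] at hne
            obtain ⟨t, htm, hcov⟩ := H6 i hi hne
            rcases List.mem_append.mp htm with hm | hm
            · exact ⟨t, by simp [hm], hcov⟩
            · rcases List.mem_cons.mp hm with rfl | hm2
              · exfalso
                obtain ⟨hc1, hc2⟩ := hcov
                simp only at hc1 hc2
                exact his ⟨by exact_mod_cast hc1, by push_cast at hc2; omega⟩
              · exact ⟨t, by simp [hm2], hcov⟩
      · -- pairwise disjointness
        rw [hassoc]
        refine (List.pairwise_middle (by intro a b hab; exact pvDisj_symm hab)).mpr ?_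
        rw [List.pairwise_cons]
        refine ⟨?_, H7r⟩
        intro t htm i ⟨hcn, hct⟩
        obtain ⟨ht1, sT, LT, e1, e2, e3, e4, e5⟩ := H4 t (by
          rcases List.mem_append.mp htm with hm | hm
          · exact List.mem_append.mpr (Or.inl hm)
          · exact List.mem_append.mpr (Or.inr (by simp [hm])))
        obtain ⟨hc1, hc2⟩ := hct
        rw [e1] at hc1
        rw [e1, e2] at hc2
        obtain ⟨hn1, hn2⟩ := hcn
        simp only at hn1 hn2
        have hiN : i = ((i.toNat : Nat) : Int) := (Int.toNat_of_nonneg (by omega)).symm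
        have hblank := hblankp i.toNat (by omega) (by omega)
        have hocct := e5 i.toNat (by omega) (by omega)
        rw [hblank] at hocct
        exact ht1 hocct.symm

theorem pvFold_sim (n : Nat) (rem : List (String × Int × Int)) :
    ∀ (state : List String) (gaps : List (Int × Int)) (pl : List (String × Int × Int)),
      pvInv n state gaps pl rem →
      rem.foldl pvStepA state = pvRender n (rem.foldl pvStepB (gaps, pl)).2 := by
  induction rem with
  | nil =>
    intro state gaps pl hinv
    obtain ⟨H1, -, -, H4, H6, -⟩ := hinv
    simp only [List.foldl_nil]
    refine (pvRender_eq n state pl H1 (fun t ht => H4 t (by simp [ht])) ?_).symm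
    intro i hi hne
    obtain ⟨t, ht, hc⟩ := H6 i hi hne
    exact ⟨t, by simpa using ht, hc⟩
  | cons h rem ih =>
    intro state gaps pl hinv
    simp only [List.foldl_cons]
    have := ih (pvStepA state h) (pvStepB (gaps, pl) h).1 (pvStepB (gaps, pl) h).2
      (pvStep_inv hinv)
    rwa [Prod.mk.eta] at this

theorem pvInit_inv (init : List String) :
    pvInv init.length init (pvParseB init 0).2 []
      (PySem.List.sorted (pvParseB init 0).1 (fun x => x.1) true) := by
  obtain ⟨C1, C2, C3, C4, C5, C6, -⟩ := pvParse_inv init 0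
  simp only [Nat.cast_zero, zero_add] at C1 C2 C3 C4 C5 C6
  refine ⟨rfl, ⟨C3, C4⟩, C5, ?_, ?_, ?_⟩
  · intro t ht
    simp only [List.nil_append] at ht
    have hm := (PySem.List.mem_sorted (pvParseB init 0).1 (fun x => x.1) true t).mp ht
    obtain ⟨hne, s, L, h1, h2, h3, h4, h5⟩ := C1 t hm
    exact ⟨hne, s, L, h1, h2, h3, h4, h5⟩
  · intro i hi hne
    obtain ⟨t, ht, hc⟩ := C6 i hi hne
    exact ⟨t, by
      simp only [List.nil_append]
      exact (PySem.List.mem_sorted (pvParseB init 0).1 (fun x => x.1) true t).mpr ht, hc⟩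
  · simp only [List.nil_append]
    have hperm := PySem.List.sorted_perm (pvParseB init 0).1 (fun x => x.1) true
    refine (hperm.pairwise_iff (by intro a b h; exact pvDisj_symm h)).mpr ?_
    refine C2.imp ?_
    intro a b hab i hc
    obtain ⟨⟨ha1, ha2⟩, hb1, hb2⟩ := hc
    omega

-- ===== VERDICT (by name: the statement is the Claim_ definition above) =====
theorem compact_filesystem_spec : Claim_equal_compact_filesystem := by
  intro init _
  unfold Spec_compact_filesystem compact_filesystem compact_filesystem_alt
  rw [pvParseB_fst]
  exact pvFold_sim init.length _ init (pvParseB init 0).2 []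
    (pvParseB_fst init 0 ▸ pvInit_inv init)
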